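-- pv_equiv track=rewrite | github.com/alaurrs/PDF_ESO | test.py | add_space_before_q
-- ===== SOURCE A (Python) =====
-- def add_space_before_q(full_text):
--     lines = full_text.split("\n")
--     new_text = ""
--     for index, line in enumerate(lines):
--         if line.startswith("Q"):
--             lines[index] = "\n" + lines[index]
--         new_text += lines[index] + "\n"
--     return new_text
-- ===== SOURCE B (Python) =====
-- def add_space_before_q(full_text):
--     out = []
--     prev = "\n"  # start of string counts as a line start
--     for ch in full_text:
--         if ch == "Q" and prev == "\n":
--             out.append("\n")
--         out.append(ch)
--         prev = ch
--     out.append("\n")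
--     return "".join(out)
-- ===== Notes on version B (the rewrite author's own statement) =====
-- stated objective: alternative
-- what changed: Replaced split('\n') + enumerate loop with repeated string concatenation by a single character-by-character pass that inserts '\n' before each 'Q' following a line start and appends one trailing '\n', joined once at the end.
import Mathlib
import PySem

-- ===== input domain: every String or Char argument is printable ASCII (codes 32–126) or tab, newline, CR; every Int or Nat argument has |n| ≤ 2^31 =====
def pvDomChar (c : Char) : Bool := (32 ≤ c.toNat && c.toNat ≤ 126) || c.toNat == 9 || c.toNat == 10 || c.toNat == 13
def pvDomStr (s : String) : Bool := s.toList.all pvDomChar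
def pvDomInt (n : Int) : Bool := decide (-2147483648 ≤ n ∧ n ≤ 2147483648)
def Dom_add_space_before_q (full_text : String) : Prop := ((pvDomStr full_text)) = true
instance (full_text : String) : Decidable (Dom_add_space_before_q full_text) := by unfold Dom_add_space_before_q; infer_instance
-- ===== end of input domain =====

-- B replaces A's split/enumerate/string-concatenation loop by a single character
-- pass that inserts '\n' before each 'Q' found at a line start (alternative decomposition).


-- ===== PORT A =====
-- lines = full_text.split("\n"); for each line: if it starts with "Q" prepend "\n"; new_text += line + "\n"
def add_space_before_q (full_text : String) : String :=
  let lines := PySem.Chars.splitOn full_text.toList ['\n']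
  String.ofList (lines.foldl (fun new_text line =>
    new_text ++ (if PySem.Chars.startswith line ['Q'] then '\n' :: line else line) ++ ['\n']) [])

-- ===== PORT B =====
-- one pass over the characters; prev = previous character ('\n' at the start of the string)
def pvAltGo : Char → List Char → List Char
  | _, [] => ['\n']
  | prev, c :: rest => (if c = 'Q' ∧ prev = '\n' then ['\n', c] else [c]) ++ pvAltGo c rest

def add_space_before_q_alt (full_text : String) : String :=
  String.ofList (pvAltGo '\n' full_text.toList)

-- ===== PRECONDITION & SPEC =====
def Spec_add_space_before_q (full_text : String) (out : String) : Prop := out = add_space_before_q_alt full_text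
instance (full_text : String) (out : String) : Decidable (Spec_add_space_before_q full_text out) := by unfold Spec_add_space_before_q; infer_instance

-- ===== CLAIM (what is proved, stated in full; the proofs are below) =====
def Claim_equal_add_space_before_q : Prop := ∀ (full_text : String), Dom_add_space_before_q full_text → Spec_add_space_before_q full_text (add_space_before_q full_text)

-- ===== LEMMAS AND PROOFS =====

-- A's per-line contribution to new_text
def pvLineOut (line : List Char) : List Char :=
  (if PySem.Chars.startswith line ['Q'] then '\n' :: line else line) ++ ['\n']

-- splitOn.go folds the pending accumulator in front of the result
theorem pv_go_acc (fuel : Nat) : ∀ (l cur : List Char) (acc : List (List Char)),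
    PySem.Chars.splitOn.go ['\n'] fuel l cur acc
      = acc.reverse ++ PySem.Chars.splitOn.go ['\n'] fuel l cur [] := by
  induction fuel with
  | zero => intro l cur acc; simp [PySem.Chars.splitOn.go]
  | succ fuel ih =>
      intro l cur acc
      cases l with
      | nil => simp [PySem.Chars.splitOn.go]
      | cons c rest =>
          simp only [PySem.Chars.splitOn.go]
          split_ifs with h
          · rw [ih _ _ (cur.reverse :: acc), ih _ _ [cur.reverse]]
            simp
          · exact ih rest (c :: cur) acc

-- the current partial piece is a prefix of the first emitted piece
theorem pv_go_cur (fuel : Nat) : ∀ (l cur : List Char),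
    PySem.Chars.splitOn.go ['\n'] fuel l cur []
      = (cur.reverse ++ (PySem.Chars.splitOn.go ['\n'] fuel l [] []).head!)
          :: (PySem.Chars.splitOn.go ['\n'] fuel l [] []).tail := by
  induction fuel with
  | zero => intro l cur; simp [PySem.Chars.splitOn.go]
  | succ fuel ih =>
      intro l cur
      cases l with
      | nil => simp [PySem.Chars.splitOn.go]
      | cons c rest =>
          simp only [PySem.Chars.splitOn.go]
          split_ifs with h
          · rw [pv_go_acc fuel _ _ [cur.reverse], pv_go_acc fuel _ _ [[].reverse]]
            simp
          · rw [ih rest (c :: cur), ih rest [c]]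
            simp

theorem pv_splitOn_nil : PySem.Chars.splitOn [] ['\n'] = [[]] := by decide

theorem pv_splitOn_newline (s : List Char) :
    PySem.Chars.splitOn ('\n' :: s) ['\n'] = [] :: PySem.Chars.splitOn s ['\n'] := by
  simp only [PySem.Chars.splitOn, PySem.Chars.splitOn.go, List.length_cons]
  split_ifs with h
  · rw [pv_go_acc]; simp
  · simp [List.isPrefixOf] at h

theorem pv_splitOn_cons (c : Char) (s : List Char) (hc : c ≠ '\n') :
    PySem.Chars.splitOn (c :: s) ['\n']
      = (c :: (PySem.Chars.splitOn s ['\n']).head!) :: (PySem.Chars.splitOn s ['\n']).tail := by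
  simp only [PySem.Chars.splitOn, PySem.Chars.splitOn.go, List.length_cons]
  split_ifs with h
  · simp [List.isPrefixOf] at h; exact absurd h.symm hc
  · rw [pv_go_cur]
    simp

theorem pv_startswith_cons (c : Char) (h : List Char) :
    PySem.Chars.startswith (c :: h) ['Q'] = (c == 'Q') := by
  simp [PySem.Chars.startswith, List.isPrefixOf, eq_comm]

-- the main correspondence: flatMap over A's split = B's single character pass
theorem pv_main (s : List Char) :
    (PySem.Chars.splitOn s ['\n']).flatMap pvLineOut = pvAltGo '\n' s ∧
    ∀ prev, prev ≠ '\n' →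
      pvAltGo prev s
        = (PySem.Chars.splitOn s ['\n']).head!
            ++ '\n' :: (PySem.Chars.splitOn s ['\n']).tail.flatMap pvLineOut := by
  induction s with
  | nil => refine ⟨by decide, ?_⟩; intro prev _; simp [pv_splitOn_nil, pvAltGo]
  | cons c s ih =>
      by_cases hc : c = '\n'
      · subst hc
        constructor
        · rw [pv_splitOn_newline]
          simp [pvAltGo, pvLineOut, ih.1, show PySem.Chars.startswith [] ['Q'] = false from by decide]
        · intro prev _
          rw [pv_splitOn_newline]
          simp [pvAltGo, ih.1]
      · constructor
        · rw [pv_splitOn_cons c s hc]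
          simp only [List.flatMap_cons, pvLineOut, pv_startswith_cons, pvAltGo, ih.2 c hc]
          by_cases hq : c = 'Q' <;> simp [hq]
        · intro prev hprev
          rw [pv_splitOn_cons c s hc]
          simp [pvAltGo, hprev, ih.2 c hc]

-- ===== VERDICT (by name: the statement is the Claim_ definition above) =====
theorem add_space_before_q_spec : Claim_equal_add_space_before_q := by
  intro full_text _
  have h := (pv_main full_text.toList).1
  show String.ofList (List.foldl (fun new_text line =>
    new_text ++ (if PySem.Chars.startswith line ['Q'] then '\n' :: line else line) ++ ['\n'])
    [] (PySem.Chars.splitOn full_text.toList ['\n'])) = _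
  rw [show (fun (new_text line : List Char) =>
        new_text ++ (if PySem.Chars.startswith line ['Q'] then '\n' :: line else line) ++ ['\n'])
      = (fun new_text line => new_text ++ pvLineOut line) from by
        funext a b; simp [pvLineOut]]
  rw [PySem.List.foldl_append_eq_flatMap pvLineOut _ [], List.nil_append, h]
  rfl
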